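-- pv_equiv track=rewrite | github.com/AP-MI-2021/lab-3-SCalin98 | main.py | get_longest_product_is_odd
-- ===== SOURCE A (Python) =====
-- def get_longest_product_is_odd(lst: list[int]) -> list[int]:
--   '''
--   Genereaza o lista cu cea mai lunga subsecventa cu proprietatea ca produsul membrilor sai este numar impar
--   :param lst: Furnizeaza lista din care va fi extrasa subsecventa
--   :return: Lista cu elemente numere intregi care contine subsecventa cu proprietatea ceruta.
--   '''
--   returnLst = []
--   returnListIndex1 = 0
--   returnListIndex2 = 0
--   currentListIndex1 = 0
--   currentListIndex2 = 0
--   for mainListElement in lst :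
--       currentListIndex2 = currentListIndex2 + 1
--       if((mainListElement%10)%2 != 0):
--         if(currentListIndex2 - currentListIndex1 >= returnListIndex2 - returnListIndex1) :
--           returnListIndex1 = currentListIndex1
--           returnListIndex2 = currentListIndex2
--       else :
--         currentListIndex1 = currentListIndex2
--   for indexRetListCopy in range (returnListIndex1,returnListIndex2):
--        returnLst.append(lst[indexRetListCopy])
--   return returnLst
-- ===== SOURCE B (Python) =====
-- def _parity_runs(lst):
--     """Split lst into maximal consecutive runs of equal parity: [(parity, run), ...]."""
--     runs = []
--     i = 0
--     n = len(lst)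
--     while i < n:
--         k = lst[i] % 2
--         j = i
--         while j < n and lst[j] % 2 == k:
--             j += 1
--         runs.append((k, lst[i:j]))
--         i = j
--     return runs
--
--
-- def get_longest_product_is_odd(lst: list[int]) -> list[int]:
--     best = []
--     for k, run in _parity_runs(lst):
--         if k:
--             if len(run) >= len(best):
--                 best = run
--     return best
-- ===== Notes on version B (the rewrite author's own statement) =====
-- stated objective: idiomatic
-- what changed: Replaces A's four manual index counters and a second index-copy loop by a group-then-select pipeline: split the list once into maximal parity runs, then keep the last longest odd run (>= tie-break) and return it directly.
import Mathlib
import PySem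

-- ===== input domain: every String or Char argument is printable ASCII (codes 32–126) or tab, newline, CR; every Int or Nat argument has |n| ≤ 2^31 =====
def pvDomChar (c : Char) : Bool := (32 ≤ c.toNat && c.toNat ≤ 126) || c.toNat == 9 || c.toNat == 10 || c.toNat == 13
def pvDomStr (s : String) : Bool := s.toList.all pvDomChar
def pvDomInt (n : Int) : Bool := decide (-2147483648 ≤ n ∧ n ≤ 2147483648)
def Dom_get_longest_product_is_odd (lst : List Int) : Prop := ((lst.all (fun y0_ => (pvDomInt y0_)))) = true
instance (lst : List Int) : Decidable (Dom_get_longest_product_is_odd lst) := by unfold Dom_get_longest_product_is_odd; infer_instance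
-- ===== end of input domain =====

-- B replaces A's four manual index counters and index-copy loop by a group-then-select
-- pipeline over maximal parity runs (idiomatic; same O(n) cost).

-- ===== PORT A =====
-- state = (returnListIndex1, returnListIndex2, currentListIndex1, currentListIndex2)
def pvStepA (s : Int × Int × Int × Int) (x : Int) : Int × Int × Int × Int :=
  let r1 := s.1; let r2 := s.2.1; let c1 := s.2.2.1; let c2 := s.2.2.2 + 1
  if PySem.Int.mod (PySem.Int.mod x 10) 2 ≠ 0 then
    if c2 - c1 ≥ r2 - r1 then (c1, c2, c1, c2) else (r1, r2, c1, c2)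
  else
    (r1, r2, c2, c2)

def get_longest_product_is_odd (lst : List Int) : List Int :=
  let s := lst.foldl pvStepA (0, 0, 0, 0)
  -- second loop: for i in range(r1, r2): returnLst.append(lst[i]).
  -- lst[i] never raises here (0 ≤ r1 ≤ i < r2 ≤ len lst, proved below), so pyGetD is exact.
  (PySem.List.pyRange s.1 s.2.1 1).foldl (fun acc i => acc ++ [PySem.List.pyGetD lst i 0]) []

-- ===== PORT B =====
-- _parity_runs: the inner `while j < n and lst[j] % 2 == k` scan is the maximal
-- same-parity prefix, i.e. takeWhile/dropWhile on the remaining suffix.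
def pvParityRuns : List Int → List (Int × List Int)
  | [] => []
  | x :: xs =>
    let k := PySem.Int.mod x 2
    (k, x :: xs.takeWhile (fun y => PySem.Int.mod y 2 == k)) ::
      pvParityRuns (xs.dropWhile (fun y => PySem.Int.mod y 2 == k))
termination_by l => l.length
decreasing_by
  simpa using Nat.lt_succ_of_le (List.length_dropWhile_le _ _)

-- loop body of B: keep the run if its parity key is truthy and it is at least as long
def pvPickRun (best : List Int) (kr : Int × List Int) : List Int :=
  if kr.1 ≠ 0 then (if kr.2.length ≥ best.length then kr.2 else best) else best

def get_longest_product_is_odd_alt (lst : List Int) : List Int :=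
  (pvParityRuns lst).foldl pvPickRun []

-- ===== PRECONDITION & SPEC =====
def Spec_get_longest_product_is_odd (lst : List Int) (out : List Int) : Prop := out = get_longest_product_is_odd_alt lst
instance (lst : List Int) (out : List Int) : Decidable (Spec_get_longest_product_is_odd lst out) := by unfold Spec_get_longest_product_is_odd; infer_instance

-- ===== CLAIM (what is proved, stated in full; the proofs are below) =====
def Claim_equal_get_longest_product_is_odd : Prop := ∀ (lst : List Int), Dom_get_longest_product_is_odd lst → Spec_get_longest_product_is_odd lst (get_longest_product_is_odd lst)

-- ===== LEMMAS AND PROOFS =====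

-- proof-side scan: fold carrying (best run so far, current trailing odd run)
def pvStepB (s : List Int × List Int) (x : Int) : List Int × List Int :=
  if PySem.Int.mod x 2 ≠ 0 then
    let cur := s.2 ++ [x]
    if s.1.length ≤ cur.length then (cur, cur) else (s.1, cur)
  else
    (s.1, [])

theorem pv_mod10_mod2 (x : Int) :
    PySem.Int.mod (PySem.Int.mod x 10) 2 = PySem.Int.mod x 2 := by
  rw [PySem.Int.mod_eq_emod_of_pos (show (0:Int) < 10 by norm_num),
      PySem.Int.mod_eq_emod_of_pos (show (0:Int) < 2 by norm_num),
      PySem.Int.mod_eq_emod_of_pos (show (0:Int) < 2 by norm_num)]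
  exact Int.emod_emod_of_dvd x (by norm_num)

theorem pv_mod2_cases (x : Int) : PySem.Int.mod x 2 = 0 ∨ PySem.Int.mod x 2 = 1 := by
  rw [PySem.Int.mod_eq_emod_of_pos (show (0:Int) < 2 by norm_num)]
  omega

theorem pv_odd_run : ∀ (run best cur : List Int),
    (∀ y ∈ run, PySem.Int.mod y 2 ≠ 0) →
    List.foldl pvStepB (best, cur) run =
      ((if run ≠ [] ∧ best.length ≤ cur.length + run.length then cur ++ run else best),
        cur ++ run) := by
  intro run
  induction run with
  | nil => intro best cur _; simp
  | cons x xs ih =>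
    intro best cur hodd
    have hx : PySem.Int.mod x 2 ≠ 0 := hodd x (by simp)
    have hxs : ∀ y ∈ xs, PySem.Int.mod y 2 ≠ 0 := fun y hy => hodd y (by simp [hy])
    simp only [List.foldl_cons, pvStepB, if_pos hx]
    by_cases hb : best.length ≤ (cur ++ [x]).length
    · rw [if_pos hb, ih _ _ hxs]
      simp only [List.length_append, List.length_cons, List.length_nil] at hb
      by_cases hxs0 : xs = []
      · subst hxs0; simp; intro h; exact absurd hb (by omega)
      · rw [if_pos ⟨hxs0, by simp; try omega⟩,
           if_pos ⟨List.cons_ne_nil _ _, by simp; try omega⟩]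
        simp
    · rw [if_neg hb, ih _ _ hxs]
      simp only [List.length_append, List.length_cons, List.length_nil] at hb
      by_cases hxs0 : xs = []
      · subst hxs0
        rw [if_neg (by simp), if_neg (by simp; try omega)]
        simp
      · by_cases hc : best.length ≤ cur.length + 1 + xs.length
        · rw [if_pos ⟨hxs0, by simp; try omega⟩,
             if_pos ⟨List.cons_ne_nil _ _, by simp; try omega⟩]
          simp
        · rw [if_neg (by simp; try omega), if_neg (by simp; try omega)]
          simp

theorem pv_even_run : ∀ (run best cur : List Int),
    (∀ y ∈ run, PySem.Int.mod y 2 = 0) → run ≠ [] →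
    List.foldl pvStepB (best, cur) run = (best, []) := by
  intro run
  induction run with
  | nil => intro best cur _ hne; exact absurd rfl hne
  | cons x xs ih =>
    intro best cur heven _
    have hx : PySem.Int.mod x 2 = 0 := heven x (by simp)
    have hx2 : x % 2 = 0 := by
      rw [← PySem.Int.mod_eq_emod_of_pos (show (0:Int) < 2 by norm_num)]; exact hx
    have hstep : pvStepB (best, cur) x = (best, []) := by simp [pvStepB, hx2]
    rw [List.foldl_cons, hstep]
    by_cases hxs0 : xs = []
    · subst hxs0; simp
    · exact ih best [] (fun y hy => heven y (by simp [hy])) hxs0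

theorem pv_scan_eq_runs (lst : List Int) :
    ∀ best, (List.foldl pvStepB (best, []) lst).1 =
      (pvParityRuns lst).foldl pvPickRun best := by
  induction lst using pvParityRuns.induct with
  | case1 => intro best; simp [pvParityRuns]
  | case2 x xs k ih =>
    intro best
    have hk : k = PySem.Int.mod x 2 := rfl
    have hsplit : xs.takeWhile (fun y => PySem.Int.mod y 2 == k) ++
        xs.dropWhile (fun y => PySem.Int.mod y 2 == k) = xs :=
      List.takeWhile_append_dropWhile
    have htpar : ∀ y ∈ xs.takeWhile (fun y => PySem.Int.mod y 2 == k),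
        PySem.Int.mod y 2 = k := by
      intro y hy; simpa using List.mem_takeWhile_imp hy
    have hrhead : ∀ z zs,
        xs.dropWhile (fun y => PySem.Int.mod y 2 == k) = z :: zs →
        PySem.Int.mod z 2 ≠ k := by
      intro z zs hzz
      have h := List.head?_dropWhile_not (fun y => PySem.Int.mod y 2 == k) xs
      rw [hzz] at h
      simpa using h
    have hL : List.foldl pvStepB (best, []) (x :: xs) =
        List.foldl pvStepB (List.foldl pvStepB (best, [])
          (x :: xs.takeWhile (fun y => PySem.Int.mod y 2 == k)))
          (xs.dropWhile (fun y => PySem.Int.mod y 2 == k)) := by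
      conv_lhs => rw [show x :: xs =
        (x :: xs.takeWhile (fun y => PySem.Int.mod y 2 == k)) ++
          xs.dropWhile (fun y => PySem.Int.mod y 2 == k) by
            rw [List.cons_append, hsplit]]
      rw [List.foldl_append]
    have hR : List.foldl pvPickRun best (pvParityRuns (x :: xs)) =
        List.foldl pvPickRun
          (pvPickRun best (k, x :: xs.takeWhile (fun y => PySem.Int.mod y 2 == k)))
          (pvParityRuns (xs.dropWhile (fun y => PySem.Int.mod y 2 == k))) := by
      conv_lhs => rw [pvParityRuns]
      simp only [List.foldl_cons, ← hk]
    rw [hL, hR]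
    rcases pv_mod2_cases x with hx0 | hx1
    · -- even run: the scan resets, B's fold skips the run
      have hx0e : x % 2 = 0 := by
        rw [← PySem.Int.mod_eq_emod_of_pos (show (0:Int) < 2 by norm_num)]; exact hx0
      have hpick0 : pvPickRun best
          (k, x :: xs.takeWhile (fun y => PySem.Int.mod y 2 == k)) = best := by
        simp [pvPickRun, hk, hx0e]
      rw [pv_even_run _ best []
            (by intro y hy
                rcases List.mem_cons.mp hy with h | h
                · subst h; exact hx0
                · rw [htpar y h, hk]; exact hx0)
            (by simp), hpick0]
      exact ih best
    · -- odd run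
      have hkk : k = 1 := hk.trans hx1
      have hodd : ∀ y ∈ x :: xs.takeWhile (fun y => PySem.Int.mod y 2 == k),
          PySem.Int.mod y 2 ≠ 0 := by
        intro y hy
        rcases List.mem_cons.mp hy with h | h
        · subst h; rw [hx1]; norm_num
        · rw [htpar y h, hkk]; norm_num
      rw [pv_odd_run _ best [] hodd]
      have hstate : (if ((x :: xs.takeWhile (fun y => PySem.Int.mod y 2 == k)) ≠ [] ∧
            best.length ≤ ([] : List Int).length +
              (x :: xs.takeWhile (fun y => PySem.Int.mod y 2 == k)).length)
          then ([] : List Int) ++ x :: xs.takeWhile (fun y => PySem.Int.mod y 2 == k)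
          else best)
          = pvPickRun best (k, x :: xs.takeWhile (fun y => PySem.Int.mod y 2 == k)) := by
        simp only [pvPickRun, hkk, List.nil_append, List.length_nil, ne_eq,
          List.cons_ne_nil, not_false_iff, true_and, ge_iff_le, zero_add]
        norm_num
      rw [hstate]
      simp only [List.nil_append]
      cases hrr : xs.dropWhile (fun y => PySem.Int.mod y 2 == k) with
      | nil => simp [pvParityRuns]
      | cons z zs =>
        have hz : PySem.Int.mod z 2 = 0 := by
          rcases pv_mod2_cases z with h0 | h1
          · exact h0
          · exact absurd (h1.trans hkk.symm) (hrhead z zs hrr)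
        have hz2 : z % 2 = 0 := by
          rw [← PySem.Int.mod_eq_emod_of_pos (show (0:Int) < 2 by norm_num)]
          exact hz
        have h1 : pvStepB
            (pvPickRun best (k, x :: xs.takeWhile (fun y => PySem.Int.mod y 2 == k)),
              x :: xs.takeWhile (fun y => PySem.Int.mod y 2 == k)) z
            = (pvPickRun best (k, x :: xs.takeWhile (fun y => PySem.Int.mod y 2 == k)),
                []) := by
          simp [pvStepB, hz2]
        have h2 : pvStepB
            (pvPickRun best (k, x :: xs.takeWhile (fun y => PySem.Int.mod y 2 == k)),
              ([] : List Int)) z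
            = (pvPickRun best (k, x :: xs.takeWhile (fun y => PySem.Int.mod y 2 == k)),
                []) := by
          simp [pvStepB, hz2]
        have hih := ih (pvPickRun best
          (k, x :: xs.takeWhile (fun y => PySem.Int.mod y 2 == k)))
        rw [hrr] at hih
        rw [List.foldl_cons, h2] at hih
        rw [List.foldl_cons, h1]
        exact hih

-- invariant tying A's four indices to the scan state over the processed prefix
theorem pv_inv (p : List Int) :
    let s := p.foldl pvStepA (0, 0, 0, 0)
    let t := p.foldl pvStepB ([], [])
    0 ≤ s.1 ∧ s.1 ≤ s.2.1 ∧ s.2.1 ≤ (p.length : Int) ∧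
    0 ≤ s.2.2.1 ∧ s.2.2.1 ≤ s.2.2.2 ∧ s.2.2.2 = (p.length : Int) ∧
    (p.drop s.1.toNat).take (s.2.1 - s.1).toNat = t.1 ∧
    p.drop s.2.2.1.toNat = t.2 := by
  induction p using List.reverseRecOn with
  | nil => simp
  | append_singleton p x ih =>
    dsimp only at ih ⊢
    obtain ⟨h1, h2, h3, h4, h5, h6, h7, h8⟩ := ih
    rw [List.foldl_append, List.foldl_append]
    set s := p.foldl pvStepA (0, 0, 0, 0) with hs
    set t := p.foldl pvStepB ([], []) with ht
    obtain ⟨r1, r2, c1, c2⟩ := s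
    obtain ⟨best, cur⟩ := t
    dsimp only at h1 h2 h3 h4 h5 h6 h7 h8 ⊢
    have hlb : best.length = (r2 - r1).toNat := by
      rw [← h7]; simp; omega
    have hlc : cur.length = p.length - c1.toNat := by
      rw [← h8]; simp
    have hbestp : ((p ++ [x]).drop r1.toNat).take (r2 - r1).toNat = best := by
      rw [List.drop_append_of_le_length (by omega), ← h7,
        List.take_append_of_le_length (by simp; try omega)]
    simp only [List.foldl_cons, List.foldl_nil, pvStepA, pvStepB, pv_mod10_mod2]
    by_cases hx : PySem.Int.mod x 2 ≠ 0
    · rw [if_pos hx, if_pos hx]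
      have hcurx : (p ++ [x]).drop c1.toNat = cur ++ [x] := by
        rw [List.drop_append_of_le_length (by omega), h8]
      by_cases hc : c2 + 1 - c1 ≥ r2 - r1
      · rw [if_pos hc, if_pos (by simp [hlb, hlc]; omega)]
        dsimp only
        refine ⟨by omega, by omega, by simp; try omega, by omega, by omega, by simp; try omega, ?_, hcurx⟩
        rw [hcurx]
        have : (c2 + 1 - c1).toNat = (cur ++ [x]).length := by simp [hlc]; omega
        rw [this, List.take_length]
      · rw [if_neg hc, if_neg (by simp [hlb, hlc]; omega)]
        dsimp only
        exact ⟨by omega, by omega, by simp; try omega, by omega, by omega, by simp; try omega,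
          hbestp, hcurx⟩
    · rw [if_neg hx, if_neg hx]
      dsimp only
      refine ⟨by omega, by omega, by simp; try omega, by omega, by omega, by simp; try omega,
        hbestp, ?_⟩
      rw [List.drop_eq_nil_of_le (by simp; try omega)]

-- the index-copy loop is the corresponding drop/take of lst
theorem pv_copy (lst : List Int) (a b : Int) (ha : 0 ≤ a) (_hab : a ≤ b)
    (hb : b ≤ (lst.length : Int)) :
    (PySem.List.pyRange a b 1).foldl (fun acc i => acc ++ [PySem.List.pyGetD lst i 0]) []
      = (lst.drop a.toNat).take (b - a).toNat := by
  rw [PySem.List.foldl_append_singleton_eq_map, PySem.List.pyRange_one, List.map_map]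
  apply List.ext_getElem
  · simp; omega
  · intro k hk1 hk2
    simp only [List.nil_append, List.length_map, List.length_range] at hk1
    simp only [List.nil_append, List.getElem_map, List.getElem_range, Function.comp_apply]
    rw [PySem.List.pyGetD_eq_getElem]
    · simp only [List.getElem_take, List.getElem_drop]
      congr 1
      omega
    · omega
    · omega

-- ===== VERDICT (by name: the statement is the Claim_ definition above) =====
theorem get_longest_product_is_odd_spec : Claim_equal_get_longest_product_is_odd := by
  intro lst _
  unfold Spec_get_longest_product_is_odd get_longest_product_is_odd get_longest_product_is_odd_alt
  have hinv := pv_inv lst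
  dsimp only at hinv
  obtain ⟨h1, h2, h3, _, _, _, h7, _⟩ := hinv
  rw [pv_copy lst _ _ h1 h2 h3, h7, pv_scan_eq_runs lst []]
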